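-- pv_equiv track=rewrite | github.com/rinagalperin/apis-re-identification | main.py | fetch_filtered_payroll
-- ===== SOURCE A (Python) =====
-- mock_employees = {
--     1: {'salary': 50000, 'role': 'Developer', 'age': 30, 'department': 'IT'},
--     2: {'salary': 60000, 'role': 'Manager', 'age': 35, 'department': 'HR'},
--     3: {'salary': 70000, 'role': 'Developer', 'age': 28, 'department': 'IT'},
--     4: {'salary': 80000, 'role': 'Analyst', 'age': 32, 'department': 'Finance'},
--     5: {'salary': 90000, 'role': 'Manager', 'age': 40, 'department': 'HR'}
-- }
--
-- def fetch_total_payroll():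
--     total_salary = sum(employee['salary'] for employee in mock_employees.values())
--     return total_salary
--
-- def fetch_filtered_payroll(role=None, age=None, department=None):
--     filtered = sum(employee['salary']
--                    for employee in mock_employees.values()
--                    if (role is None or str(employee['role']).lower() == str(role).lower())
--                    and (age is None or str(employee['age']).lower() == str(age).lower())
--                    and (department is None or str(employee['department']).lower() == str(department).lower())
--                    )
--     return fetch_total_payroll()-filtered
-- ===== SOURCE B (Python) =====
-- mock_employees = {
--     1: {'salary': 50000, 'role': 'Developer', 'age': 30, 'department': 'IT'},
--     2: {'salary': 60000, 'role': 'Manager', 'age': 35, 'department': 'HR'},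
--     3: {'salary': 70000, 'role': 'Developer', 'age': 28, 'department': 'IT'},
--     4: {'salary': 80000, 'role': 'Analyst', 'age': 32, 'department': 'Finance'},
--     5: {'salary': 90000, 'role': 'Manager', 'age': 40, 'department': 'HR'}
-- }
--
-- def fetch_filtered_payroll(role=None, age=None, department=None):
--     # Recursive decomposition: an employee is excluded from the filtered payroll
--     # when ANY active filter mismatches (De Morgan); sum the excluded salaries by
--     # structural recursion over the employee list -- no total, no subtraction.
--     def excluded(emp):
--         checks = [(emp['role'], role), (emp['age'], age), (emp['department'], department)]
--         return any(f is not None and str(v).lower() != str(f).lower() for v, f in checks)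
--
--     def go(emps):
--         if not emps:
--             return 0
--         head, rest = emps[0], emps[1:]
--         s = go(rest)
--         return s + head['salary'] if excluded(head) else s
--
--     return go(list(mock_employees.values()))
-- ===== Notes on version B (the rewrite author's own statement) =====
-- stated objective: alternative
-- what changed: Replaces A's two staged folds (total payroll minus the filtered sum) by a structural recursion over the employee list that directly accumulates the salaries of excluded employees, where exclusion is an any() over a list of (value, filter) check pairs (De Morgan of A's conjunctive filter).
import Mathlib
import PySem

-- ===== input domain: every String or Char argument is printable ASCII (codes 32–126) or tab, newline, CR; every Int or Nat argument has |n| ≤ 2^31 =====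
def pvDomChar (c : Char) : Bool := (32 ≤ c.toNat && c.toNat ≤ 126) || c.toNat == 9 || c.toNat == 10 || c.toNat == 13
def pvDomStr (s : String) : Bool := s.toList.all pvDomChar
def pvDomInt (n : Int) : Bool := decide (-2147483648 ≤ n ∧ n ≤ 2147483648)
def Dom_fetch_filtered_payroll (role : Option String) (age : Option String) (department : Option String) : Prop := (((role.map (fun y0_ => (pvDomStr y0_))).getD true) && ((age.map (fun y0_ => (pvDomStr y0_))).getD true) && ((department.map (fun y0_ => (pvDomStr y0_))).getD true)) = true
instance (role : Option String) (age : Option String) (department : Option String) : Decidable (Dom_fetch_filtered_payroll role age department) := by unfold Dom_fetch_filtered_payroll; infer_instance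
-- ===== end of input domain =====

-- B replaces A's 'total payroll minus filtered sum' (two folds and a subtraction) by a
-- structural recursion that directly sums the salaries of excluded employees, exclusion
-- being an any() over (value, filter) check pairs; same return value everywhere.

-- ===== PORT A =====
structure PvEmployee where
  salary : Int
  role : String
  age : Int
  department : String
deriving DecidableEq, Repr

def pvMockEmployees : List PvEmployee :=
  [⟨50000, "Developer", 30, "IT"⟩,
   ⟨60000, "Manager", 35, "HR"⟩,
   ⟨70000, "Developer", 28, "IT"⟩,
   ⟨80000, "Analyst", 32, "Finance"⟩,
   ⟨90000, "Manager", 40, "HR"⟩]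

def fetch_total_payroll : Int :=
  pvMockEmployees.foldl (fun acc e => acc + e.salary) 0

-- the filter condition of A's generator, named as a helper (one expression in the Python)
def pvMatch (role : Option String) (age : Option String) (department : Option String) (e : PvEmployee) : Bool :=
  (match role with | none => true | some r => PySem.Str.lower e.role == PySem.Str.lower r)
  && (match age with | none => true | some a => PySem.Str.lower (PySem.Int.toStr e.age) == PySem.Str.lower a)
  && (match department with | none => true | some d => PySem.Str.lower e.department == PySem.Str.lower d)

def fetch_filtered_payroll (role : Option String) (age : Option String) (department : Option String) : Int :=
  let filtered := pvMockEmployees.foldl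
    (fun acc e => if pvMatch role age department e then acc + e.salary else acc) 0
  fetch_total_payroll - filtered

-- ===== PORT B =====
-- Source B's 'checks' list: (stringified field value, corresponding filter) pairs
def pvChecks (role : Option String) (age : Option String) (department : Option String) (e : PvEmployee) : List (String × Option String) :=
  [(e.role, role), (PySem.Int.toStr e.age, age), (e.department, department)]

-- Source B's 'excluded': any active filter mismatches
def pvExcluded (role : Option String) (age : Option String) (department : Option String) (e : PvEmployee) : Bool :=
  (pvChecks role age department e).any
    (fun vf => match vf.2 with
      | none => false
      | some f => PySem.Str.lower vf.1 != PySem.Str.lower f)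

-- Source B's 'go': structural recursion, head decided after the recursive call on the tail
def pvGo (role : Option String) (age : Option String) (department : Option String) : List PvEmployee → Int
  | [] => 0
  | e :: rest =>
      let s := pvGo role age department rest
      if pvExcluded role age department e then s + e.salary else s

def fetch_filtered_payroll_alt (role : Option String) (age : Option String) (department : Option String) : Int :=
  pvGo role age department pvMockEmployees

-- ===== PRECONDITION & SPEC =====
def Spec_fetch_filtered_payroll (role : Option String) (age : Option String) (department : Option String) (out : Int) : Prop := out = fetch_filtered_payroll_alt role age department
instance (role : Option String) (age : Option String) (department : Option String) (out : Int) : Decidable (Spec_fetch_filtered_payroll role age department out) := by unfold Spec_fetch_filtered_payroll; infer_instance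

-- ===== CLAIM (what is proved, stated in full; the proofs are below) =====
def Claim_equal_fetch_filtered_payroll : Prop := ∀ (role : Option String) (age : Option String) (department : Option String), Dom_fetch_filtered_payroll role age department → Spec_fetch_filtered_payroll role age department (fetch_filtered_payroll role age department)

-- ===== LEMMAS AND PROOFS =====

-- B's exclusion condition is exactly the negation of A's filter condition
theorem pvExcluded_eq_not (role age department : Option String) (e : PvEmployee) :
    pvExcluded role age department e = !(pvMatch role age department e) := by
  cases role <;> cases age <;> cases department <;>
    simp [pvExcluded, pvChecks, pvMatch, Bool.not_and, bne, Bool.or_assoc]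

-- shifting the accumulator out of the unconditional salary fold
theorem pv_shift_tot (l : List PvEmployee) (a : Int) :
    l.foldl (fun acc e => acc + e.salary) a = a + l.foldl (fun acc e => acc + e.salary) 0 := by
  induction l generalizing a with
  | nil => simp
  | cons e t ih => simp only [List.foldl_cons]; rw [ih (a + e.salary), ih (0 + e.salary)]; ring

-- shifting the accumulator out of the conditional salary fold
theorem pv_shift_cond (p : PvEmployee → Bool) (l : List PvEmployee) (a : Int) :
    l.foldl (fun acc e => if p e then acc + e.salary else acc) a
      = a + l.foldl (fun acc e => if p e then acc + e.salary else acc) 0 := by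
  induction l generalizing a with
  | nil => simp
  | cons e t ih =>
    cases h : p e <;> simp only [List.foldl_cons, h, reduceIte]
    · exact ih a
    · rw [ih (a + e.salary), ih (0 + e.salary)]; ring

-- B's recursion equals A's 'total minus filtered' on any employee list
theorem pvGo_eq (role age department : Option String) (l : List PvEmployee) :
    pvGo role age department l
      = l.foldl (fun acc e => acc + e.salary) 0
        - l.foldl (fun acc e => if pvMatch role age department e then acc + e.salary else acc) 0 := by
  induction l with
  | nil => simp [pvGo]
  | cons e t ih =>
    cases h : pvMatch role age department e with
    | true =>
      simp only [pvGo, pvExcluded_eq_not, List.foldl_cons, h, Bool.not_true, Bool.false_eq_true, reduceIte, ih]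
      rw [pv_shift_tot t (0 + e.salary), pv_shift_cond (pvMatch role age department) t (0 + e.salary)]
      omega
    | false =>
      simp only [pvGo, pvExcluded_eq_not, List.foldl_cons, h, Bool.not_false, Bool.false_eq_true, reduceIte, ih]
      rw [pv_shift_tot t (0 + e.salary)]
      omega

-- ===== VERDICT (by name: the statement is the Claim_ definition above) =====
theorem fetch_filtered_payroll_spec : Claim_equal_fetch_filtered_payroll := by
  intro role age department _
  unfold Spec_fetch_filtered_payroll fetch_filtered_payroll fetch_filtered_payroll_alt
    fetch_total_payroll
  rw [pvGo_eq]
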